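-- pv_equiv track=rewrite | github.com/wkeymis/Basic_Programming | Python_part/Dodana_solutions_2024-2025/Series08/Sacred Cat of Burma.py | color_distribution
-- ===== SOURCE A (Python) =====
-- def color(genotype):
--     if 'C' in genotype[:2]:
--         if 'D' in genotype[2:]:
--             return 'seal'
--         elif 'd' in genotype[2:]:
--             return 'blue'
--     elif 'c' in genotype[:2]:
--         if 'D' in genotype[2:]:
--             return 'chocolate'
--         elif 'd' in genotype[2:]:
--             return 'lilac'
--
-- def combinations(genotype):
--     return [c + d for c in genotype[:2] for d in genotype[2:]]
--
-- def punnett(male, female, pprint=False):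
--     male_combinations = combinations(male)
--     female_combinations = combinations(female)
--     square = [[m[0] + f[0] + m[1] + f[1] for f in female_combinations] for m in male_combinations]
--
--     if pprint:
--         return '\n'.join([' '.join(row) for row in square])
--     return square
--
-- def color_distribution(male, female):
--     square = punnett(male, female)
--     color_count = {}
--     for row in square:
--         for genotype in row:
--             point_color = color(genotype)
--             color_count[point_color] = color_count.get(point_color, 0) + 1
--     return color_count
-- ===== SOURCE B (Python) =====
-- _NAME = {('C', 'D'): 'seal', ('C', 'd'): 'blue', ('c', 'D'): 'chocolate', ('c', 'd'): 'lilac'}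
--
--
-- def _gene(m, f, dom, rec):
--     """Category of one gene for one parent-allele pair: dominant if present, else recessive if present, else None."""
--     if m == dom or f == dom:
--         return dom
--     if m == rec or f == rec:
--         return rec
--     return None
--
--
-- def color_distribution(male, female):
--     # Classify the two genes independently (no Punnett square, no genotype strings):
--     # category of the color gene for every (male allele, female allele) pair, and likewise for dilution.
--     color_rows = [[_gene(mc, fc, 'C', 'c') for fc in female[:2]] for mc in male[:2]]
--     dilution_rows = [[_gene(md, fd, 'D', 'd') for fd in female[2:]] for md in male[2:]]
--     dist = {}
--     for crow in color_rows:
--         for drow in dilution_rows: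
--             for c in crow:
--                 for d in drow:
--                     key = _NAME.get((c, d))
--                     dist[key] = dist.get(key, 0) + 1
--     return dist
-- ===== Notes on version B (the rewrite author's own statement) =====
-- stated objective: faster
-- what changed: B never builds the Punnett square of 4-char genotype strings: it classifies the color and dilution genes independently into category rows once and counts via a (category, category) -> name table lookup, instead of assembling each genotype string and re-parsing it with slice/membership tests in color().
-- outside the precondition, e.g. on color_distribution('aaaa', 'aaaa'): A returns {None: 16}, B returns {None: 16}
import Mathlib
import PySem

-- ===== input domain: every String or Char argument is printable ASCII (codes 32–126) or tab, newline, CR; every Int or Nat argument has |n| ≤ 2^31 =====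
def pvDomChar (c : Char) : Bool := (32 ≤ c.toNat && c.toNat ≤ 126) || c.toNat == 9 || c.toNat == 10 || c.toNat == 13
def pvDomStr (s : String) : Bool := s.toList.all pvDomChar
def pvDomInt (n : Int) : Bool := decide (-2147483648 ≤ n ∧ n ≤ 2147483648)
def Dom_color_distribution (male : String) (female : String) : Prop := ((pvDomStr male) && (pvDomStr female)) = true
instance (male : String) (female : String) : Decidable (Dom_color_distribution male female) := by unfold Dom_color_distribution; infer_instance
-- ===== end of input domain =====

-- B replaces A's Punnett square of genotype strings by classifying the two genes independently
-- and looking the pair of categories up in a table (objective: alternative decomposition).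

-- ===== PORT A =====
-- color(genotype): genotype is a 4-char string (List Char); slices [:2]/[2:] with nonnegative
-- bounds are take/drop, '<1-char str> in <str>' is char membership; Python's None result is none.
def pyColorA (g : List Char) : Option String :=
  if 'C' ∈ g.take 2 then
    (if 'D' ∈ g.drop 2 then some "seal"
     else if 'd' ∈ g.drop 2 then some "blue"
     else none)
  else if 'c' ∈ g.take 2 then
    (if 'D' ∈ g.drop 2 then some "chocolate"
     else if 'd' ∈ g.drop 2 then some "lilac"
     else none)
  else none

-- combinations(genotype): the 2-char string c + d is represented as the pair (c, d)
-- (it is built from exactly two chars; m[0]/m[1] below are its components).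
def pyCombinations (g : List Char) : List (Char × Char) :=
  (g.take 2).flatMap (fun c => (g.drop 2).map (fun d => (c, d)))

-- punnett(male, female) with the default pprint=False (the only call site)
def pyPunnett (male female : List Char) : List (List (List Char)) :=
  (pyCombinations male).map (fun m => (pyCombinations female).map (fun f => [m.1, f.1, m.2, f.2]))

def color_distribution (male : String) (female : String) : List (String × Int) :=
  -- the dict loop over the square; Python's None key is no String: rendered as ""
  -- in the final items (inside Pre_ the None key never occurs)
  (((pyPunnett male.toList female.toList).foldl (fun acc row =>
      row.foldl (fun acc g => acc.insert (pyColorA g) (acc.getD (pyColorA g) 0 + 1)) acc)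
    (PySem.Dict.empty : PySem.Dict (Option String) Int)).items).map (fun p => (p.1.getD "", p.2))

-- ===== PORT B =====
-- _gene(m, f, dom, rec)
def geneB (m f dom rec : Char) : Option Char :=
  if m = dom ∨ f = dom then some dom
  else if m = rec ∨ f = rec then some rec
  else none

-- _NAME.get((c, d)): lookup in the literal 4-entry table, None on a miss
def nameGet (c d : Option Char) : Option String :=
  if c = some 'C' ∧ d = some 'D' then some "seal"
  else if c = some 'C' ∧ d = some 'd' then some "blue"
  else if c = some 'c' ∧ d = some 'D' then some "chocolate"
  else if c = some 'c' ∧ d = some 'd' then some "lilac"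
  else none

def color_distribution_alt (male : String) (female : String) : List (String × Int) :=
  -- color_rows / dilution_rows comprehensions inlined into the accumulation loop;
  -- same "" rendering of the (inside Pre_ never occurring) None key as in port A
  ((((male.toList.take 2).map (fun mc =>
      (female.toList.take 2).map (fun fc => geneB mc fc 'C' 'c'))).foldl (fun acc crow =>
    ((male.toList.drop 2).map (fun md =>
        (female.toList.drop 2).map (fun fd => geneB md fd 'D' 'd'))).foldl (fun acc drow =>
      crow.foldl (fun acc c =>
        drow.foldl (fun acc d => acc.insert (nameGet c d) (acc.getD (nameGet c d) 0 + 1)) acc)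
        acc) acc)
    (PySem.Dict.empty : PySem.Dict (Option String) Int)).items).map (fun p => (p.1.getD "", p.2))

-- ===== PRECONDITION & SPEC =====
-- Pre_ excludes exactly the inputs on which the distribution carries Python's None key (some cell
-- of the square names no color): A returns a dict with a non-str key there, not a value of the
-- declared type dict[str, int].  Inside Pre_ every cell is named (or the square is empty).
-- (The two ports, which both render that unrepresentable None key as "", agree even outside
-- Pre_, so the equivalence proof below does not need the hypothesis.)
def Pre_color_distribution (male : String) (female : String) : Prop :=
  ((male.toList.take 2).isEmpty || (male.toList.drop 2).isEmpty
    || (female.toList.take 2).isEmpty || (female.toList.drop 2).isEmpty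
    || ((male.toList.take 2).all (fun a => (female.toList.take 2).all (fun b =>
          a == 'C' || b == 'C' || a == 'c' || b == 'c'))
        && (male.toList.drop 2).all (fun a => (female.toList.drop 2).all (fun b =>
          a == 'D' || b == 'D' || a == 'd' || b == 'd')))) = true
instance (male : String) (female : String) : Decidable (Pre_color_distribution male female) := by
  unfold Pre_color_distribution; infer_instance

def pvWitness_color_distribution : String × String := ("CcDd", "CcDd")

def Spec_color_distribution (male : String) (female : String) (out : List (String × Int)) : Prop := out = color_distribution_alt male female
instance (male : String) (female : String) (out : List (String × Int)) : Decidable (Spec_color_distribution male female out) := by unfold Spec_color_distribution; infer_instance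

-- ===== CLAIM (what is proved, stated in full; the proofs are below) =====
def Claim_equal_color_distribution : Prop := ∀ (male : String) (female : String), Dom_color_distribution male female → Pre_color_distribution male female → Spec_color_distribution male female (color_distribution male female)

-- ===== LEMMAS AND PROOFS =====

-- the counting fold of A's inner row loop is the counting fold over the mapped key list
theorem foldl_key_map_A (row : List (List Char)) (init : PySem.Dict (Option String) Int) :
    row.foldl (fun acc g => acc.insert (pyColorA g) (acc.getD (pyColorA g) 0 + 1)) init
      = (row.map pyColorA).foldl (fun acc k => acc.insert k (acc.getD k 0 + 1)) init := by
  rw [List.foldl_map]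

-- the counting fold of B's innermost loop is the counting fold over the mapped key list
theorem foldl_key_map_B (c : Option Char) (drow : List (Option Char))
    (init : PySem.Dict (Option String) Int) :
    drow.foldl (fun acc d => acc.insert (nameGet c d) (acc.getD (nameGet c d) 0 + 1)) init
      = (drow.map (nameGet c)).foldl (fun acc k => acc.insert k (acc.getD k 0 + 1)) init := by
  rw [List.foldl_map]

-- a fold whose body folds (g x) is the fold over the flatMap
theorem foldl_key_flatMap {α : Type} (g : α → List (Option String)) (l : List α)
    (init : PySem.Dict (Option String) Int) :
    l.foldl (fun acc x => (g x).foldl (fun acc k => acc.insert k (acc.getD k 0 + 1)) acc) init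
      = (l.flatMap g).foldl (fun acc k => acc.insert k (acc.getD k 0 + 1)) init := by
  induction l generalizing init with
  | nil => simp
  | cons x xs ih => simp [List.flatMap_cons, List.foldl_append, ih]

-- per-cell key equality: A's color() on the assembled genotype equals B's table lookup
-- on the two independently classified genes
theorem key_eq (a x b y : Char) :
    pyColorA [a, x, b, y] = nameGet (geneB a x 'C' 'c') (geneB b y 'D' 'd') := by
  simp only [pyColorA, nameGet, geneB, List.take_succ_cons, List.take_zero,
    List.drop_succ_cons, List.drop_zero, List.mem_cons, List.not_mem_nil, or_false, eq_comm]
  split_ifs <;> simp_all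

-- the two flat key sequences coincide
theorem keys_eq (male female : List Char) :
    (pyPunnett male female).flatMap (fun row => row.map pyColorA)
      = ((male.take 2).map (fun mc => (female.take 2).map (fun fc => geneB mc fc 'C' 'c'))).flatMap
          (fun crow =>
            ((male.drop 2).map (fun md =>
                (female.drop 2).map (fun fd => geneB md fd 'D' 'd'))).flatMap
              (fun drow => crow.flatMap (fun c => drow.map (fun d => nameGet c d)))) := by
  simp only [pyPunnett, pyCombinations, List.flatMap_map, List.map_flatMap, List.map_map,
    List.flatMap_assoc, Function.comp_def, key_eq]

theorem color_distribution_eq_alt (male female : String) :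
    color_distribution male female = color_distribution_alt male female := by
  unfold color_distribution color_distribution_alt
  simp only [foldl_key_map_A, foldl_key_map_B, foldl_key_flatMap, keys_eq]

-- ===== VERDICT (by name: the statement is the Claim_ definition above) =====
theorem color_distribution_spec : Claim_equal_color_distribution := by
  intro male female _ _
  unfold Spec_color_distribution
  exact color_distribution_eq_alt male female
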